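-- pv_equiv track=rewrite | github.com/icoding2016/study | PY/free_exercise/stairs.py | stairs_ways
-- ===== SOURCE A (Python) =====
-- def stairs_ways(remain:int, path:list=None)->None:
--     if None == path:
--         path = []
--
--     if remain < 0:
--         return
--     if remain == 0:
--         yield path
--
--     if remain == 1:
--         yield path+[1]
--     elif remain == 2:
--         yield path+[1,1]
--         yield path+[2]
--     else:
--         for x in stairs_ways(remain-1, path+[1]):
--             yield x
--         for x in stairs_ways(remain-2, path+[2]):
--             yield x
--         for x in stairs_ways(remain-3, path+[3]):
--             yield x
--     return
-- ===== SOURCE B (Python) =====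
-- def stairs_ways(remain: int, path: list = None):
--     # explicit LIFO stack replacing the recursion; children pushed 3,2,1 so the
--     # 1-step branch is explored first, preserving the pre-order yield order
--     stack = [(remain, [] if path is None else path)]
--     while stack:
--         r, p = stack.pop()
--         if r < 0:
--             continue
--         if r == 0:
--             yield p
--         else:
--             stack.append((r - 3, p + [3]))
--             stack.append((r - 2, p + [2]))
--             stack.append((r - 1, p + [1]))
-- ===== Notes on version B (the rewrite author's own statement) =====
-- stated objective: alternative
-- what changed: The recursive generator with special cases for remain==1/2 is replaced by an iterative pre-order DFS over an explicit LIFO stack of (remain, path) frames with uniform rules (r<0 skip, r==0 yield, else push the 3/2/1 children); Pre_ excludes remain >= 999, where A's depth-remain recursion raises RecursionError under CPython's default limit.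
import Mathlib
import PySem

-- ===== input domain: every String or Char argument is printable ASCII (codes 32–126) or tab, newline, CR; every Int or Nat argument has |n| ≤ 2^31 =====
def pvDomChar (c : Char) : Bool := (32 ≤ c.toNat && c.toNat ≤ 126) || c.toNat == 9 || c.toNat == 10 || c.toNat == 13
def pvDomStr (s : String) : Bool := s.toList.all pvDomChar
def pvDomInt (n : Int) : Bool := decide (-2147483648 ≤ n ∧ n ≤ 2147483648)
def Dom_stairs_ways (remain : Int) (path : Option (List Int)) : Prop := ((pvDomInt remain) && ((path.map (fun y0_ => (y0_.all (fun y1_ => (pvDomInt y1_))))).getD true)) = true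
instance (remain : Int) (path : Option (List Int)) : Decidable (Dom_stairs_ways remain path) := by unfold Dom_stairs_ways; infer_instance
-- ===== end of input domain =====

-- B replaces the recursive generator by an iterative pre-order DFS over an explicit
-- LIFO stack of (remain, path) frames with uniform rules (alternative decomposition).


-- ===== PORT A =====
-- termination helper for A's recursion (cited by name in decreasing_by)
theorem swA_dec (r k : Int) (h : ¬ r < 0) (hk : 1 ≤ k) : (r - k + 1).toNat < (r + 1).toNat := by
  omega

-- A's recursive generator, after the None→[] default has been resolved.
def swA (r : Int) (p : List Int) : List (List Int) :=
  if r < 0 then []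
  else
    (if r = 0 then [p] else []) ++
    (if r = 1 then [p ++ [1]]
     else if r = 2 then [p ++ [1, 1], p ++ [2]]
     else swA (r - 1) (p ++ [1]) ++ swA (r - 2) (p ++ [2]) ++ swA (r - 3) (p ++ [3]))
termination_by (r + 1).toNat
decreasing_by
  · exact swA_dec _ 1 (by assumption) (by norm_num)
  · exact swA_dec _ 2 (by assumption) (by norm_num)
  · exact swA_dec _ 3 (by assumption) (by norm_num)

def stairs_ways (remain : Int) (path : Option (List Int)) : List (List Int) :=
  swA remain (path.getD [])

-- ===== PORT B =====
-- termination measure for the stack loop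
def swWt (r : Int) : Nat := 4 ^ (r + 1).toNat

def swMsr (s : List (Int × List Int)) : Nat := (s.map (fun f => swWt f.1)).sum

-- the `while stack:` loop, as structural recursion on a fuel bound; the fuel swMsr s
-- never runs out (each iteration strictly decreases swMsr, proved in swMsr_pop/swMsr_push)
def swLoopGo : Nat → List (Int × List Int) → List (List Int)
  | _, [] => []
  | 0, _ :: _ => []
  | Nat.succ n, f :: rest =>
    if f.1 < 0 then swLoopGo n rest
    else if f.1 = 0 then f.2 :: swLoopGo n rest
    else swLoopGo n ((f.1 - 1, f.2 ++ [1]) :: (f.1 - 2, f.2 ++ [2]) :: (f.1 - 3, f.2 ++ [3]) :: rest)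

def swLoop (s : List (Int × List Int)) : List (List Int) := swLoopGo (swMsr s) s

def stairs_ways_alt (remain : Int) (path : Option (List Int)) : List (List Int) :=
  swLoop [(remain, path.getD [])]

-- ===== PRECONDITION & SPEC =====
-- Pre_ excludes remain ≥ 999: there A's recursion descends `remain` levels (one generator
-- frame per step of 1) and overflows CPython's default recursion limit, raising RecursionError.
def Pre_stairs_ways (remain : Int) (path : Option (List Int)) : Prop := remain < 999
instance (remain : Int) (path : Option (List Int)) : Decidable (Pre_stairs_ways remain path) := by unfold Pre_stairs_ways; infer_instance

def pvWitness_stairs_ways : Int × Option (List Int) := (5, none)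

def Spec_stairs_ways (remain : Int) (path : Option (List Int)) (out : List (List Int)) : Prop := out = stairs_ways_alt remain path
instance (remain : Int) (path : Option (List Int)) (out : List (List Int)) : Decidable (Spec_stairs_ways remain path out) := by unfold Spec_stairs_ways; infer_instance

-- ===== CLAIM (what is proved, stated in full; the proofs are below) =====
def Claim_equal_stairs_ways : Prop := ∀ (remain : Int) (path : Option (List Int)), Dom_stairs_ways remain path → Pre_stairs_ways remain path → Spec_stairs_ways remain path (stairs_ways remain path)

-- ===== LEMMAS AND PROOFS =====
theorem swWt_dec (r : Int) (_h : ¬ r < 0) (_h0 : ¬ r = 0) :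
    swWt (r - 1) + swWt (r - 2) + swWt (r - 3) < swWt r := by
  unfold swWt
  have e1 : (r - 1 + 1).toNat = r.toNat := by omega
  have e2 : (r - 2 + 1).toNat = r.toNat - 1 := by omega
  have e3 : (r - 3 + 1).toNat = r.toNat - 2 := by omega
  have e0 : (r + 1).toNat = r.toNat + 1 := by omega
  rw [e1, e2, e3, e0]
  have h1 : (4:Nat) ^ (r.toNat - 1) ≤ 4 ^ r.toNat := Nat.pow_le_pow_right (by norm_num) (by omega)
  have h2 : (4:Nat) ^ (r.toNat - 2) ≤ 4 ^ r.toNat := Nat.pow_le_pow_right (by norm_num) (by omega)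
  have h3 : (4:Nat) ^ (r.toNat + 1) = 4 * 4 ^ r.toNat := by ring
  have hp : 0 < (4:Nat) ^ r.toNat := Nat.pow_pos (by norm_num)
  omega

theorem swWt_pos (r : Int) : 0 < swWt r := Nat.pow_pos (by norm_num)

-- the two decreasing steps of the stack loop, as named lemmas (cited in decreasing_by)
theorem swMsr_pop (r : Int) (p : List Int) (rest : List (Int × List Int)) :
    swMsr rest < swMsr ((r, p) :: rest) := by
  simp only [swMsr, List.map_cons, List.sum_cons]
  have := swWt_pos r; omega

theorem swMsr_push (r : Int) (p p1 p2 p3 : List Int) (rest : List (Int × List Int))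
    (h : ¬ r < 0) (h0 : ¬ r = 0) :
    swMsr ((r - 1, p1) :: (r - 2, p2) :: (r - 3, p3) :: rest) < swMsr ((r, p) :: rest) := by
  simp only [swMsr, List.map_cons, List.sum_cons]
  have := swWt_dec r h h0; omega

theorem swA_neg (r : Int) (p : List Int) (h : r < 0) : swA r p = [] := by
  rw [swA]; simp [h]

theorem swA_zero (p : List Int) : swA 0 p = [p] := by
  rw [swA]; norm_num [swA_neg]

theorem swA_one (p : List Int) : swA 1 p = [p ++ [1]] := by
  rw [swA]; norm_num

theorem swA_step (r : Int) (p : List Int) (h : ¬ r < 0) (h0 : ¬ r = 0) :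
    swA r p = swA (r - 1) (p ++ [1]) ++ swA (r - 2) (p ++ [2]) ++ swA (r - 3) (p ++ [3]) := by
  by_cases h1 : r = 1
  · subst h1
    norm_num [swA_one, swA_zero, swA_neg]
  by_cases h2 : r = 2
  · subst h2
    rw [swA]
    norm_num [swA_one, swA_zero, swA_neg, List.append_assoc]
  · rw [swA]
    simp [h, h0, h1, h2]

theorem swLoopGo_eq (n : Nat) : ∀ s : List (Int × List Int), swMsr s ≤ n →
    swLoopGo n s = s.flatMap (fun f => swA f.1 f.2) := by
  induction n with
  | zero =>
    intro s hs
    cases s with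
    | nil => simp [swLoopGo]
    | cons f rest =>
      exfalso
      obtain ⟨r, p⟩ := f
      have h1 := swMsr_pop r p rest
      omega
  | succ n ih =>
    intro s hs
    cases s with
    | nil => simp [swLoopGo]
    | cons f rest =>
      obtain ⟨r, p⟩ := f
      by_cases hlt : r < 0
      · have hp := swMsr_pop r p rest
        simp only [swLoopGo, if_pos hlt]
        rw [ih rest (by omega)]
        simp [swA_neg r p hlt]
      · by_cases h0 : r = 0
        · have hp := swMsr_pop r p rest
          simp only [swLoopGo, if_neg hlt, if_pos h0]
          rw [ih rest (by omega)]
          simp [h0, swA_zero]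
        · have hp := swMsr_push r p (p ++ [1]) (p ++ [2]) (p ++ [3]) rest hlt h0
          simp only [swLoopGo, if_neg hlt, if_neg h0]
          rw [ih _ (by omega)]
          simp [swA_step r p hlt h0, List.append_assoc]

theorem swLoop_eq_flatMap (s : List (Int × List Int)) :
    swLoop s = s.flatMap (fun f => swA f.1 f.2) :=
  swLoopGo_eq (swMsr s) s (le_refl _)

-- ===== VERDICT (by name: the statement is the Claim_ definition above) =====
theorem stairs_ways_spec : Claim_equal_stairs_ways := by
  intro remain path _ _
  unfold Spec_stairs_ways stairs_ways stairs_ways_alt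
  rw [swLoop_eq_flatMap]
  simp
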